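-- pv_equiv track=rewrite | github.com/KilianPoirier/AdventCode2023 | Day1_Trebuchet/main.py | is_following_string_a_digit
-- ===== SOURCE A (Python) =====
-- def is_following_string_a_digit(input_str):
--     """Finds a string associated to a digit and returns its integer value
--     if the given string contains one, otherwise returns None, e.g.
--     "eth3e6three"    -->    None
--     "onejd9e4"       -->    1
--
--     Args:
--         input_str (str): string to search through
--
--     Returns:
--         int or None: value fo the digit found if there is one, otherwise None
--     """
--     digit_str_list = ["one",
--                       "two",
--                       "three",
--                       "four",
--                       "five",
--                       "six",
--                       "seven",
--                       "eight",
--                       "nine"]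
--     digit_value = None
--     for index, digit in enumerate(digit_str_list):
--         if len(input_str) >= len(digit):
--             if input_str[:len(digit)] == digit:
--                 digit_value = index + 1
--
--     return digit_value
-- ===== SOURCE B (Python) =====
-- def is_following_string_a_digit(input_str):
--     digit_values = {"one": 1, "two": 2, "three": 3, "four": 4, "five": 5,
--                     "six": 6, "seven": 7, "eight": 8, "nine": 9}
--     for length in (3, 4, 5):
--         value = digit_values.get(input_str[:length])
--         if value is not None:
--             return value
--     return None
-- ===== Notes on version B (the rewrite author's own statement) =====
-- stated objective: idiomatic
-- what changed: Replaces A's enumerate-and-overwrite scan over all nine number words with a word-to-value dict probed once per distinct prefix length (3, 4, 5), returning on the first hit.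
import Mathlib
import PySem

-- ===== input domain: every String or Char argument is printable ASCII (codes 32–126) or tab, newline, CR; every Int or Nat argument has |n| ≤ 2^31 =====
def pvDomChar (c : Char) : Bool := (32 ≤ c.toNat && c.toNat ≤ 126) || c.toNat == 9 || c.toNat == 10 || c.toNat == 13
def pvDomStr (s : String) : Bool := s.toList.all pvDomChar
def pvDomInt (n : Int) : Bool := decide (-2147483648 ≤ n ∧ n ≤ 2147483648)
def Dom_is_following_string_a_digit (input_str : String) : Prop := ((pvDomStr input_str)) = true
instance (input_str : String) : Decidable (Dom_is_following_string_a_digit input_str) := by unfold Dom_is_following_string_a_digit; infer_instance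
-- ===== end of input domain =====

-- B replaces A's scan over the nine number words by a dict keyed by word, probed once per distinct
-- prefix length (3, 4, 5) with an early return on the first hit (objective: idiomatic; not faster).

-- ===== PORT A =====
-- A's list of the nine digit words, as lists of characters
def pvWordsA : List (List Char) :=
  [['o','n','e'], ['t','w','o'], ['t','h','r','e','e'], ['f','o','u','r'], ['f','i','v','e'],
   ['s','i','x'], ['s','e','v','e','n'], ['e','i','g','h','t'], ['n','i','n','e']]

-- literal port of A: enumerate the nine words, keep overwriting digit_value on each match
def is_following_string_a_digit (input_str : String) : Option Int :=
  (PySem.List.enumerate pvWordsA).foldl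
    (fun acc p =>
      if PySem.List.len input_str.toList ≥ PySem.List.len p.2 then
        if PySem.List.slice input_str.toList none (some (PySem.List.len p.2)) = p.2 then some (p.1 + 1) else acc
      else acc) none

-- ===== PORT B =====
-- B's dict mapping each number word to its value
def pvDigitDict : PySem.Dict (List Char) Int :=
  PySem.Dict.ofList
    [(['o','n','e'],1), (['t','w','o'],2), (['t','h','r','e','e'],3), (['f','o','u','r'],4),
     (['f','i','v','e'],5), (['s','i','x'],6), (['s','e','v','e','n'],7), (['e','i','g','h','t'],8),
     (['n','i','n','e'],9)]

-- B's loop 'for length in (3, 4, 5)' with early return on a dict hit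
def pvLookupLoop (l : List Char) : List Nat → Option Int
  | [] => none
  | n :: rest =>
    match pvDigitDict.get? (l.take n) with
    | some v => some v
    | none => pvLookupLoop l rest

def is_following_string_a_digit_alt (input_str : String) : Option Int :=
  pvLookupLoop input_str.toList [3, 4, 5]

-- ===== PRECONDITION & SPEC =====
def Spec_is_following_string_a_digit (input_str : String) (out : Option Int) : Prop := out = is_following_string_a_digit_alt input_str
instance (input_str : String) (out : Option Int) : Decidable (Spec_is_following_string_a_digit input_str out) := by unfold Spec_is_following_string_a_digit; infer_instance

-- ===== CLAIM (what is proved, stated in full; the proofs are below) =====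
def Claim_equal_is_following_string_a_digit : Prop := ∀ (input_str : String), Dom_is_following_string_a_digit input_str → Spec_is_following_string_a_digit input_str (is_following_string_a_digit input_str)

-- ===== LEMMAS AND PROOFS =====
theorem pvDigitDict_eq : pvDigitDict = PySem.Dict.mk
    [(['o','n','e'],1), (['t','w','o'],2), (['t','h','r','e','e'],3), (['f','o','u','r'],4),
     (['f','i','v','e'],5), (['s','i','x'],6), (['s','e','v','e','n'],7), (['e','i','g','h','t'],8),
     (['n','i','n','e'],9)] := by decide

theorem take_len {l w : List Char} {m : Nat} (h : l.take m = w) (hw : w.length = m) :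
    m ≤ l.length := by
  have := congrArg List.length h
  simp [List.length_take, hw] at this
  omega

theorem take_of_take {l w : List Char} {m n : Nat} (hmn : n ≤ m) (h : l.take m = w) :
    l.take n = w.take n := by
  rw [← h, List.take_take, Nat.min_eq_left hmn]

theorem take_split (l : List Char) (m k : Nat) :
    l.take (m + k) = l.take m ++ (l.drop m).take k := by rw [List.take_add]


theorem take_ne_of_length {l w : List Char} {n : Nat} (h : n < w.length) : l.take n ≠ w := by
  intro he
  have := congrArg List.length he
  simp [List.length_take] at this
  omega

theorem take_longer_ne {l w : List Char} {m n : Nat} (hnm : n ≤ m) (hw : w.length ≤ n)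
    (hne : l.take n ≠ w) : l.take m ≠ w := by
  intro he
  exact hne (by rw [take_of_take hnm he, List.take_of_length_le hw])


set_option maxRecDepth 4096 in
theorem key (l : List Char) :
    (PySem.List.enumerate pvWordsA).foldl
      (fun acc p =>
        if PySem.List.len l ≥ PySem.List.len p.2 then
          if PySem.List.slice l none (some (PySem.List.len p.2)) = p.2 then some (p.1 + 1) else acc
        else acc) none = pvLookupLoop l [3, 4, 5] := by
  simp only [pvWordsA, PySem.List.enumerate_cons, PySem.List.enumerate_nil, List.foldl,
    PySem.List.len_eq, PySem.List.slice_to_natCast, pvLookupLoop, pvDigitDict_eq,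
    PySem.Dict.get?]
  by_cases h1 : l.take 3 = ['o','n','e']
  · have hlen := take_len h1 (by decide)
    have ht4 := take_split l 3 1
    have ht5 := take_split l 3 2
    rw [h1] at ht4 ht5
    simp_all
  by_cases h2 : l.take 3 = ['t','w','o']
  · have hlen := take_len h2 (by decide)
    have ht4 := take_split l 3 1
    have ht5 := take_split l 3 2
    rw [h2] at ht4 ht5
    simp_all
  by_cases h3 : l.take 5 = ['t','h','r','e','e']
  · have hlen := take_len h3 (by decide)
    have ht3 := take_of_take (by decide : 3 ≤ 5) h3
    have ht4 := take_of_take (by decide : 4 ≤ 5) h3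
    simp only [List.take] at ht3 ht4
    simp_all
  by_cases h4 : l.take 4 = ['f','o','u','r']
  · have hlen := take_len h4 (by decide)
    have ht3 := take_of_take (by decide : 3 ≤ 4) h4
    have ht5 := take_split l 4 1
    rw [h4] at ht5
    simp only [List.take] at ht3
    simp_all
  by_cases h5 : l.take 4 = ['f','i','v','e']
  · have hlen := take_len h5 (by decide)
    have ht3 := take_of_take (by decide : 3 ≤ 4) h5
    have ht5 := take_split l 4 1
    rw [h5] at ht5
    simp only [List.take] at ht3
    simp_all
  by_cases h6 : l.take 3 = ['s','i','x']
  · have hlen := take_len h6 (by decide)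
    have ht4 := take_split l 3 1
    have ht5 := take_split l 3 2
    rw [h6] at ht4 ht5
    simp_all
  by_cases h7 : l.take 5 = ['s','e','v','e','n']
  · have hlen := take_len h7 (by decide)
    have ht3 := take_of_take (by decide : 3 ≤ 5) h7
    have ht4 := take_of_take (by decide : 4 ≤ 5) h7
    simp only [List.take] at ht3 ht4
    simp_all
  by_cases h8 : l.take 5 = ['e','i','g','h','t']
  · have hlen := take_len h8 (by decide)
    have ht3 := take_of_take (by decide : 3 ≤ 5) h8
    have ht4 := take_of_take (by decide : 4 ≤ 5) h8
    simp only [List.take] at ht3 ht4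
    simp_all
  by_cases h9 : l.take 4 = ['n','i','n','e']
  · have hlen := take_len h9 (by decide)
    have ht3 := take_of_take (by decide : 3 ≤ 4) h9
    have ht5 := take_split l 4 1
    rw [h9] at ht5
    simp only [List.take] at ht3
    simp_all
  ·
    have n4_1 := take_longer_ne (by decide : 3 ≤ 4) (by decide) h1
    have n5_1 := take_longer_ne (by decide : 3 ≤ 5) (by decide) h1
    have n4_2 := take_longer_ne (by decide : 3 ≤ 4) (by decide) h2
    have n5_2 := take_longer_ne (by decide : 3 ≤ 5) (by decide) h2
    have n3_3 : l.take 3 ≠ ['t','h','r','e','e'] := take_ne_of_length (by decide)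
    have n4_3 : l.take 4 ≠ ['t','h','r','e','e'] := take_ne_of_length (by decide)
    have n3_4 : l.take 3 ≠ ['f','o','u','r'] := take_ne_of_length (by decide)
    have n5_4 := take_longer_ne (by decide : 4 ≤ 5) (by decide) h4
    have n3_5 : l.take 3 ≠ ['f','i','v','e'] := take_ne_of_length (by decide)
    have n5_5 := take_longer_ne (by decide : 4 ≤ 5) (by decide) h5
    have n4_6 := take_longer_ne (by decide : 3 ≤ 4) (by decide) h6
    have n5_6 := take_longer_ne (by decide : 3 ≤ 5) (by decide) h6
    have n3_7 : l.take 3 ≠ ['s','e','v','e','n'] := take_ne_of_length (by decide)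
    have n4_7 : l.take 4 ≠ ['s','e','v','e','n'] := take_ne_of_length (by decide)
    have n3_8 : l.take 3 ≠ ['e','i','g','h','t'] := take_ne_of_length (by decide)
    have n4_8 : l.take 4 ≠ ['e','i','g','h','t'] := take_ne_of_length (by decide)
    have n3_9 : l.take 3 ≠ ['n','i','n','e'] := take_ne_of_length (by decide)
    have n5_9 := take_longer_ne (by decide : 4 ≤ 5) (by decide) h9
    have s1 := Ne.symm h1
    have s1_4 := Ne.symm n4_1
    have s1_5 := Ne.symm n5_1
    have s2 := Ne.symm h2
    have s2_4 := Ne.symm n4_2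
    have s2_5 := Ne.symm n5_2
    have s3 := Ne.symm h3
    have s3_3 := Ne.symm n3_3
    have s3_4 := Ne.symm n4_3
    have s4 := Ne.symm h4
    have s4_3 := Ne.symm n3_4
    have s4_5 := Ne.symm n5_4
    have s5 := Ne.symm h5
    have s5_3 := Ne.symm n3_5
    have s5_5 := Ne.symm n5_5
    have s6 := Ne.symm h6
    have s6_4 := Ne.symm n4_6
    have s6_5 := Ne.symm n5_6
    have s7 := Ne.symm h7
    have s7_3 := Ne.symm n3_7
    have s7_4 := Ne.symm n4_7
    have s8 := Ne.symm h8
    have s8_3 := Ne.symm n3_8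
    have s8_4 := Ne.symm n4_8
    have s9 := Ne.symm h9
    have s9_3 := Ne.symm n3_9
    have s9_5 := Ne.symm n5_9
    simp_all [beq_iff_eq]

-- ===== VERDICT (by name: the statement is the Claim_ definition above) =====
theorem is_following_string_a_digit_spec : Claim_equal_is_following_string_a_digit := by
  intro s _
  unfold Spec_is_following_string_a_digit is_following_string_a_digit is_following_string_a_digit_alt
  exact key s.toList
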